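-- pv_equiv track=rewrite | github.com/yongheelee87/DevEnv | SwVerification/Lib/Common/basicFunction.py | check_front_space
-- ===== SOURCE A (Python) =====
-- def check_front_space(string: str) -> int:
--     # counter
--     count = 0
--
--     # loop for search each index
--     for i in range(0, len(string)):
--         # check each char
--         # is blank or not
--         if string[i] == " ":
--             count += 1
--         elif string[i] == "#":
--             pass
--         else:
--             break
--     return count
-- ===== SOURCE B (Python) =====
-- def check_front_space(string: str) -> int:
--     # B: single right-to-left pass, no early exit: count spaces since the last
--     # offending char; any char other than ' '/'#' resets the counter, so the
--     # final value is the number of spaces left of the leftmost offending char.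
--     count = 0
--     for c in reversed(string):
--         if c == " ":
--             count += 1
--         elif c != "#":
--             count = 0
--     return count
-- ===== Notes on version B (the rewrite author's own statement) =====
-- stated objective: alternative
-- what changed: Traverses the string in the opposite direction: a single right-to-left pass with a reset-on-violation accumulator (a non-space/non-# char zeroes the counter) replaces A's left-to-right indexed scan with early break; correctness rests on the spaces before the leftmost violator being exactly those counted since the last reset.
import Mathlib
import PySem

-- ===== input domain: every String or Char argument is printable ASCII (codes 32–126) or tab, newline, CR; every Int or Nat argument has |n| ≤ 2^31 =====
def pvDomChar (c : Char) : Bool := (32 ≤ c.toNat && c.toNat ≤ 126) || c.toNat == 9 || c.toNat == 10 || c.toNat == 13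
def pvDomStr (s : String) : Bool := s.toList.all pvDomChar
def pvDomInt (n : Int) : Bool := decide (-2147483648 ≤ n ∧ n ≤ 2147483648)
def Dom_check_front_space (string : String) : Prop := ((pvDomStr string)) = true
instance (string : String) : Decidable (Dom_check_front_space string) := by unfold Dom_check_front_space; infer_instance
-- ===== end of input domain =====

-- B scans the string right-to-left with a reset-on-violation counter instead of A's
-- left-to-right scan with early break; proved equal for all strings.
-- ===== PORT A =====
-- the for-loop over range(0, len(string)) with early break, as structural recursion on the chars
def cfsLoop : List Char → Int → Int
  | [], count => count
  | c :: cs, count =>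
    if c = ' ' then cfsLoop cs (count + 1)
    else if c = '#' then cfsLoop cs count
    else count

def check_front_space (string : String) : Int :=
  cfsLoop string.toList 0

-- ===== PORT B =====
-- single pass over the reversed character list; a char other than ' '/'#' resets the counter
def check_front_space_alt (string : String) : Int :=
  string.toList.reverse.foldl
    (fun count c => if c = ' ' then count + 1 else if c = '#' then count else 0) 0

-- ===== PRECONDITION & SPEC =====
def Spec_check_front_space (string : String) (out : Int) : Prop := out = check_front_space_alt string
instance (string : String) (out : Int) : Decidable (Spec_check_front_space string out) := by unfold Spec_check_front_space; infer_instance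

-- ===== CLAIM =====
def Claim_equal_check_front_space : Prop := ∀ (string : String), Dom_check_front_space string → Spec_check_front_space string (check_front_space string)

-- ===== LEMMAS AND PROOFS =====
-- A's loop counts the spaces in the leading run of ' '/'#'
theorem cfsLoop_eq (l : List Char) : ∀ count : Int,
    cfsLoop l count = count + ((l.takeWhile (fun c => c == ' ' || c == '#')).count ' ' : Int) := by
  induction l with
  | nil => intro count; simp [cfsLoop]
  | cons c cs ih =>
    intro count
    by_cases hs : c = ' '
    · simp [cfsLoop, hs, ih]; ring
    · by_cases hh : c = '#'
      · simp [cfsLoop, hh, ih]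
      · simp [cfsLoop, hs, hh]

-- B's reversed fold equals a foldr on the original list, which also counts those spaces
theorem foldr_reset_eq (l : List Char) :
    l.foldr (fun c count => if c = ' ' then count + 1 else if c = '#' then count else (0 : Int)) 0
      = ((l.takeWhile (fun c => c == ' ' || c == '#')).count ' ' : Int) := by
  induction l with
  | nil => simp
  | cons c cs ih =>
    by_cases hs : c = ' '
    · simp [hs, ih]
    · by_cases hh : c = '#'
      · simp [hh, ih]
      · simp [hs, hh]

-- ===== VERDICT =====
theorem check_front_space_spec : Claim_equal_check_front_space := by
  intro s _
  unfold Spec_check_front_space check_front_space check_front_space_alt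
  rw [List.foldl_reverse, cfsLoop_eq]
  simp only [foldr_reset_eq]
  simp
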